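-- pv_equiv track=rewrite | github.com/yattom/yomoyama | trans_server/text.py | split_into_lines
-- ===== SOURCE A (Python) =====
-- def split_into_lines(data):
--     lines = []
--     head = 0
--     for i, c in enumerate(data):
--         if c == '\n':
--             lines.append((head, i + 1))
--             head = i + 1
--     if lines[-1][1] < len(data):
--         lines.append((head, len(data)))
--     return lines
-- ===== SOURCE B (Python) =====
-- def split_into_lines(data):
--     ends = [i + 1 for i, c in enumerate(data) if c == '\n']
--     lines = list(zip([0] + ends, ends))
--     head = ends[-1] if ends else 0
--     if head < len(data):
--         lines.append((head, len(data)))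
--     return lines
-- ===== Notes on version B (the rewrite author's own statement) =====
-- stated objective: alternative
-- what changed: Replaces A's scan-and-emit loop with mutable (lines, head) state by a two-phase boundary pairing: collect the newline end positions, zip shifted boundary lists into ranges, then append the tail range.
import Mathlib
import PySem

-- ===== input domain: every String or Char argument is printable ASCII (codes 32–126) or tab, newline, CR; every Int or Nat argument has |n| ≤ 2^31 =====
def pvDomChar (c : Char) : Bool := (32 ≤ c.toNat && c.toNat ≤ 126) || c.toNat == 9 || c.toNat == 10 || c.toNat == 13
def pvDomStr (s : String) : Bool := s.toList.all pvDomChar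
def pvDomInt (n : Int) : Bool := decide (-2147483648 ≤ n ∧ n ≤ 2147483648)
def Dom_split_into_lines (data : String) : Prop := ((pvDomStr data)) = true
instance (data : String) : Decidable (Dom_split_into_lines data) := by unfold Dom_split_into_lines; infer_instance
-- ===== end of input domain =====

-- B replaces A's scan-and-emit loop by a newline-position table paired into boundary ranges (different decomposition, same cost).

-- ===== PORT A =====
def split_into_lines (data : String) : List (Int × Int) :=
  let st := (PySem.List.enumerate data.toList).foldl
      (fun (st : List (Int × Int) × Int) (ic : Int × Char) =>
        if ic.2 = '\n' then (st.1 ++ [(st.2, ic.1 + 1)], ic.1 + 1) else st)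
      ([], 0)
  let lines := st.1
  let head := st.2
  match PySem.List.pyGet? lines (-1) with
  | none => []   -- lines[-1] raises IndexError in Python; excluded by Pre_
  | some last =>
      if last.2 < PySem.Str.len data then lines ++ [(head, PySem.Str.len data)] else lines

-- ===== PORT B =====
def split_into_lines_alt (data : String) : List (Int × Int) :=
  let ends : List Int := (PySem.List.enumerate data.toList).filterMap
      (fun (ic : Int × Char) => if ic.2 = '\n' then some (ic.1 + 1) else none)
  let lines := List.zip ((0 : Int) :: ends) ends
  let head := ends.getLast?.getD 0   -- 'ends[-1] if ends else 0'
  if head < PySem.Str.len data then lines ++ [(head, PySem.Str.len data)] else lines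

-- ===== PRECONDITION & SPEC =====
-- Pre_ excludes exactly the inputs where A raises IndexError (data with no '\n': lines[-1] on an empty list).
def Pre_split_into_lines (data : String) : Prop := '\n' ∈ data.toList
instance (data : String) : Decidable (Pre_split_into_lines data) := by unfold Pre_split_into_lines; infer_instance
def pvWitness_split_into_lines : String := "a\nb"

def Spec_split_into_lines (data : String) (out : List (Int × Int)) : Prop := out = split_into_lines_alt data
instance (data : String) (out : List (Int × Int)) : Decidable (Spec_split_into_lines data out) := by unfold Spec_split_into_lines; infer_instance

-- ===== CLAIM (what is proved, stated in full; the proofs are below) =====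
def Claim_equal_split_into_lines : Prop := ∀ (data : String), Dom_split_into_lines data → Pre_split_into_lines data → Spec_split_into_lines data (split_into_lines data)
-- ===== LEMMAS AND PROOFS =====

-- the newline-end table of a list of (index, char) pairs (abbrev keeps it syntactically transparent)
abbrev pvEnds (l : List (Int × Char)) : List Int :=
  l.filterMap (fun (ic : Int × Char) => if ic.2 = '\n' then some (ic.1 + 1) else none)

theorem pvGetLast?_cons_getD (a h : Int) (t : List Int) :
    ((a :: t).getLast?).getD h = (t.getLast?).getD a := by
  cases t with
  | nil => simp
  | cons b t =>
    obtain ⟨x, hx⟩ := Option.isSome_iff_exists.mp (by simp : (b :: t).getLast?.isSome)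
    simp [List.getLast?_cons_cons, hx]

-- invariant of A's loop: it builds exactly the boundary pairing of the newline ends
theorem pvFoldA (l : List (Int × Char)) (ls : List (Int × Int)) (h : Int) :
    l.foldl
      (fun (st : List (Int × Int) × Int) (ic : Int × Char) =>
        if ic.2 = '\n' then (st.1 ++ [(st.2, ic.1 + 1)], ic.1 + 1) else st)
      (ls, h)
    = (ls ++ List.zip (h :: pvEnds l) (pvEnds l), (pvEnds l).getLast?.getD h) := by
  induction l generalizing ls h with
  | nil => simp [pvEnds]
  | cons a l ih =>
    by_cases ha : a.2 = '\n'
    · simp only [List.foldl_cons, ha, ih, pvEnds, List.filterMap_cons]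
      simp [List.zip, pvGetLast?_cons_getD]
    · simp only [List.foldl_cons, ih, pvEnds, List.filterMap_cons, ha]
      simp

theorem pvZipLastSnd (E : List Int) (h : Int) (hE : E ≠ []) :
    ((List.zip (h :: E) E).getLast?).map Prod.snd = E.getLast? := by
  induction E generalizing h with
  | nil => exact absurd rfl hE
  | cons a t ih =>
    cases t with
    | nil => simp
    | cons b t =>
      have := ih (h := a) (by simp)
      simp only [List.zip_cons_cons] at this ⊢
      rw [List.getLast?_cons_cons]
      · rw [this, List.getLast?_cons_cons]

theorem pvEndsNe (l : List (Int × Char)) (hmem : '\n' ∈ l.map Prod.snd) :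
    pvEnds l ≠ [] := by
  intro hnil
  rw [pvEnds, List.filterMap_eq_nil_iff] at hnil
  obtain ⟨p, hp, hps⟩ := List.mem_map.mp hmem
  have := hnil p hp
  rw [hps] at this
  simp at this

-- ===== VERDICT (by name: the statement is the Claim_ definition above) =====
theorem split_into_lines_spec : Claim_equal_split_into_lines := by
  intro data _ hpre
  unfold Spec_split_into_lines split_into_lines split_into_lines_alt
  rw [pvFoldA]
  simp only [List.nil_append]
  set E := List.filterMap (fun (ic : Int × Char) => if ic.2 = '\n' then some (ic.1 + 1) else none) (PySem.List.enumerate data.toList) with hEdef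
  have hmem : '\n' ∈ (PySem.List.enumerate data.toList).map Prod.snd := by
    rw [show ((PySem.List.enumerate data.toList).map Prod.snd) = data.toList from
      PySem.List.map_snd_enumerate data.toList 0]
    exact hpre
  have hE : E ≠ [] := pvEndsNe _ hmem
  cases hlast : E.getLast? with
  | none => exact absurd (List.getLast?_eq_none_iff.mp hlast) hE
  | some v =>
    have hz := pvZipLastSnd E 0 hE
    rw [hlast] at hz
    obtain ⟨p, hp, hps⟩ := Option.map_eq_some_iff.mp hz
    rw [PySem.List.pyGet?_neg_one, hp]
    simp only [pvEnds, ← hEdef]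
    simp [hps]
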